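-- pv_equiv track=rewrite | github.com/Danny213123/cps831-python-dependency-project | src/agentic_python_dependency/tools/docker_executor.py | _normalize_requirement_name
-- ===== SOURCE A (Python) =====
-- def _normalize_requirement_name(requirement: str) -> str:
--     candidate = requirement.strip()
--     if not candidate:
--         return ""
--     for separator in ("[", "<", ">", "=", "!", "~"):
--         if separator in candidate:
--             candidate = candidate.split(separator, 1)[0]
--     return candidate.strip().replace("-", "_").lower()
-- ===== SOURCE B (Python) =====
-- def _normalize_requirement_name(requirement: str) -> str:
--     candidate = requirement.strip()
--     if not candidate:
--         return ""
--     separators = {"[", "<", ">", "=", "!", "~"}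
--     for index, char in enumerate(candidate):
--         if char in separators:
--             candidate = candidate[:index]
--             break
--     return candidate.strip().replace("-", "_").lower()
-- ===== Notes on version B (the rewrite author's own statement) =====
-- stated objective: alternative
-- what changed: Replaces the per-separator loop of membership tests plus split calls with a single left-to-right character scan that finds the first separator index, breaks early, and slices once.
import Mathlib
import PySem

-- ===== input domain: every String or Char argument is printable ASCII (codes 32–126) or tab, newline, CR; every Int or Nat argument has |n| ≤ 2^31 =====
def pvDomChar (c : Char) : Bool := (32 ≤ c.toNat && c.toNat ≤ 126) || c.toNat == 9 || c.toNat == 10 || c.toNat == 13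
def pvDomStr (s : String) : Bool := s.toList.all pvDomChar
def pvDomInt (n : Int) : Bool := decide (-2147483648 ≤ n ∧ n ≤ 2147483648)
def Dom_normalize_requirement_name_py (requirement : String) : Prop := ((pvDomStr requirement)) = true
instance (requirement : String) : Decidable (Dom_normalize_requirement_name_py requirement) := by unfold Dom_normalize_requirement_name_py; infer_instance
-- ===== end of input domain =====

-- B replaces A's per-separator membership-test + split loop by one left-to-right
-- character scan that finds the first separator index and slices once (alternative decomposition).

-- ===== PORT A =====
-- literal port of A: strip, empty guard, then for each separator in order,
-- if it occurs, candidate = candidate.split(sep, 1)[0]; finally strip/replace/lower.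
def normalize_requirement_name_py (requirement : String) : String :=
  let candidate := PySem.Str.strip requirement
  if candidate = "" then ""
  else
    let candidate := ["[", "<", ">", "=", "!", "~"].foldl
      (fun cand sep =>
        if PySem.Str.isIn sep cand then
          -- candidate.split(separator, 1)[0]: split is nonempty, [0] is its head
          ((PySem.Str.splitMax? cand sep 1).getD []).headD ""
        else cand) candidate
    PySem.Str.lower (PySem.Str.replace (PySem.Str.strip candidate) "-" "_")

-- ===== PORT B =====
-- the separator set of Source B
def pvSepChars : List Char := ['[', '<', '>', '=', '!', '~']

-- Source B's enumerate-scan: index of the first separator character, if any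
def pvFirstSepIdx : List Char → Nat → Option Nat
  | [], _ => none
  | c :: rest, i => if pvSepChars.contains c then some i else pvFirstSepIdx rest (i + 1)

def normalize_requirement_name_py_alt (requirement : String) : String :=
  let candidate := PySem.Str.strip requirement
  if candidate = "" then ""
  else
    let candidate :=
      match pvFirstSepIdx candidate.toList 0 with
      | some i => PySem.Str.slice candidate none (some (i : Int))  -- candidate[:index]
      | none => candidate
    PySem.Str.lower (PySem.Str.replace (PySem.Str.strip candidate) "-" "_")

-- ===== PRECONDITION & SPEC =====
def Spec_normalize_requirement_name_py (requirement : String) (out : String) : Prop := out = normalize_requirement_name_py_alt requirement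
instance (requirement : String) (out : String) : Decidable (Spec_normalize_requirement_name_py requirement out) := by unfold Spec_normalize_requirement_name_py; infer_instance

-- ===== CLAIM (what is proved, stated in full; the proofs are below) =====
def Claim_equal_normalize_requirement_name_py : Prop := ∀ (requirement : String), Dom_normalize_requirement_name_py requirement → Spec_normalize_requirement_name_py requirement (normalize_requirement_name_py requirement)

-- ===== LEMMAS AND PROOFS =====

-- splitOnMax.go with maxsplit budget 0 returns immediately
lemma pv_go_zero (c : Char) (fuel : Nat) (l x : List Char) :
    PySem.Chars.splitOnMax.go [c] fuel 0 l [] [x] = [x, l] := by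
  cases fuel with
  | zero => simp [PySem.Chars.splitOnMax.go]
  | succ n =>
    cases l with
    | nil => simp [PySem.Chars.splitOnMax.go]
    | cons a r => simp [PySem.Chars.splitOnMax.go]

-- head of splitOnMax.go at maxsplit 1: the prefix before the first occurrence of c
lemma pv_go_one_head (c : Char) :
    ∀ (fuel : Nat) (l cur : List Char), l.length < fuel →
      (PySem.Chars.splitOnMax.go [c] fuel 1 l cur []).head? =
        some (cur.reverse ++ l.takeWhile (· ≠ c)) := by
  intro fuel
  induction fuel with
  | zero => intro l cur h; omega
  | succ n ih =>
    intro l cur h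
    cases l with
    | nil => simp [PySem.Chars.splitOnMax.go]
    | cons a rest =>
      by_cases hac : a = c
      · subst hac
        simp [PySem.Chars.splitOnMax.go, List.isPrefixOf, pv_go_zero]
      · have hlt : rest.length < n := by simp at h; omega
        have hne : ¬ ((c == a && true) = true) := by
          simp only [Bool.and_true, beq_iff_eq]
          exact fun hcc => hac hcc.symm
        simp only [PySem.Chars.splitOnMax.go, List.isPrefixOf]
        rw [if_neg (by omega : ¬ (1 : Nat) = 0), if_neg hne, ih rest (a :: cur) hlt]
        simp [hac]

-- one pass of A's loop body, on toList: cut at the first occurrence of c (or keep all)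
lemma pv_stepA_toList (c : Char) (sep cand : String) (hsep : sep.toList = [c]) :
    (if PySem.Str.isIn sep cand then
        ((PySem.Str.splitMax? cand sep 1).getD []).headD ""
      else cand).toList = cand.toList.takeWhile (· ≠ c) := by
  by_cases hin : PySem.Str.isIn sep cand = true
  · rw [if_pos hin]
    have h1 : PySem.Chars.splitMax? cand.toList [c] 1 =
        some (PySem.Chars.splitOnMax cand.toList [c] 1) := by
      simp [PySem.Chars.splitMax?]
    have h2 := pv_go_one_head c (cand.toList.length + 1) cand.toList [] (by omega)
    unfold PySem.Str.splitMax?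
    rw [hsep, h1]
    unfold PySem.Chars.splitOnMax
    rw [if_neg (by omega : ¬ (1 : Int) < 0)]
    simp only [Int.toNat_one]
    cases hgo : PySem.Chars.splitOnMax.go [c] (cand.toList.length + 1) 1 cand.toList [] [] with
    | nil => rw [hgo] at h2; simp at h2
    | cons hd tl =>
      rw [hgo] at h2
      simp at h2
      simp [h2]
  · rw [if_neg hin]
    have hnotmem : c ∉ cand.toList := by
      intro hmem
      apply hin
      rw [PySem.Str.isIn_iff_infix, hsep]
      obtain ⟨s₁, s₂, hsplit⟩ := List.append_of_mem hmem
      exact ⟨s₁, s₂, by rw [hsplit]; simp⟩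
    rw [List.takeWhile_eq_self_iff.mpr]
    intro a ha
    simp
    exact fun h => hnotmem (h ▸ ha)

-- shifting the start index of the scan
lemma pv_firstSepIdx_shift (l : List Char) : ∀ i : Nat,
    pvFirstSepIdx l (i + 1) = (pvFirstSepIdx l i).map (· + 1) := by
  induction l with
  | nil => intro i; simp [pvFirstSepIdx]
  | cons a rest ih =>
    intro i
    by_cases h : a ∈ pvSepChars
    · simp [pvFirstSepIdx, h]
    · simp only [pvFirstSepIdx, ih]
      cases hr : pvFirstSepIdx rest i <;> simp [h]

-- B's cut equals takeWhile over the complement of the separator set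
lemma pv_cut_eq (l : List Char) :
    (match pvFirstSepIdx l 0 with
      | some i => l.take i
      | none => l) = l.takeWhile (fun x => !(pvSepChars.contains x)) := by
  induction l with
  | nil => simp [pvFirstSepIdx]
  | cons a rest ih =>
    by_cases h : a ∈ pvSepChars
    · simp [pvFirstSepIdx, h]
    · rw [List.takeWhile_cons]
      simp only [show (!pvSepChars.contains a) = true by simpa using h]
      rw [← ih]
      simp only [pvFirstSepIdx]
      rw [pv_firstSepIdx_shift rest 0]
      cases hr : pvFirstSepIdx rest 0 <;> simp [h]

-- ===== VERDICT (by name: the statement is the Claim_ definition above) =====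
theorem normalize_requirement_name_py_spec : Claim_equal_normalize_requirement_name_py := by
  intro requirement _
  unfold Spec_normalize_requirement_name_py normalize_requirement_name_py normalize_requirement_name_py_alt
  by_cases hempty : PySem.Str.strip requirement = ""
  · simp [hempty]
  · rw [if_neg hempty, if_neg hempty]
    set sr := PySem.Str.strip requirement
    have hA : (["[", "<", ">", "=", "!", "~"].foldl
        (fun (cand sep : String) =>
          if PySem.Str.isIn sep cand then
            ((PySem.Str.splitMax? cand sep 1).getD []).headD ""
          else cand) sr).toList
        = sr.toList.takeWhile (fun x => !(pvSepChars.contains x)) := by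
      simp only [List.foldl]
      rw [pv_stepA_toList '~' "~" _ (by decide)]
      rw [pv_stepA_toList '!' "!" _ (by decide)]
      rw [pv_stepA_toList '=' "=" _ (by decide)]
      rw [pv_stepA_toList '>' ">" _ (by decide)]
      rw [pv_stepA_toList '<' "<" _ (by decide)]
      rw [pv_stepA_toList '[' "[" _ (by decide)]
      simp only [List.takeWhile_takeWhile]
      congr 1
      funext x
      simp only [decide_eq_true_eq, pvSepChars]
      by_cases h1 : x = '~' <;> by_cases h2 : x = '!' <;> by_cases h3 : x = '=' <;>
        by_cases h4 : x = '>' <;> by_cases h5 : x = '<' <;> by_cases h6 : x = '[' <;>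
        simp [h1, h2, h3, h4, h5, h6]
    have hB : (match pvFirstSepIdx sr.toList 0 with
        | some i => PySem.Str.slice sr none (some (i : Int))
        | none => sr).toList
        = sr.toList.takeWhile (fun x => !(pvSepChars.contains x)) := by
      rw [← pv_cut_eq sr.toList]
      cases hr : pvFirstSepIdx sr.toList 0 with
      | none => simp
      | some i =>
        simp only [PySem.Str.slice, String.toList_ofList, PySem.Chars.slice_eq_listSlice]
        rw [PySem.List.slice_to _ (by positivity)]
        simp
    have hkey : (["[", "<", ">", "=", "!", "~"].foldl
        (fun (cand sep : String) =>
          if PySem.Str.isIn sep cand then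
            ((PySem.Str.splitMax? cand sep 1).getD []).headD ""
          else cand) sr)
        = (match pvFirstSepIdx sr.toList 0 with
          | some i => PySem.Str.slice sr none (some (i : Int))
          | none => sr) := by
      have h2 := congrArg String.ofList (hA.trans hB.symm)
      simpa using h2
    rw [hkey]
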